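-- pv_equiv track=rewrite | github.com/yangtianyinying/GraphColoringProblem | doc/CSPLatex/analysis-3/code/analysis-3.py | three_colorable
-- ===== SOURCE A (Python) =====
-- COLOR_COUNT = 3
--
-- def three_colorable(adjacency: tuple[tuple[int, ...], ...]) -> bool:
--     order = sorted(range(len(adjacency)), key=lambda node: (-len(adjacency[node]), node))
--     colors = [-1] * len(adjacency)
--
--     def backtrack(index: int) -> bool:
--         if index == len(order):
--             return True
--         node = order[index]
--         unavailable = {colors[neighbor] for neighbor in adjacency[node] if colors[neighbor] != -1}
--         for color in range(COLOR_COUNT):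
--             if color in unavailable:
--                 continue
--             colors[node] = color
--             if backtrack(index + 1):
--                 return True
--             colors[node] = -1
--         return False
--
--     return backtrack(0)
-- ===== SOURCE B (Python) =====
-- COLOR_COUNT = 3
--
-- def three_colorable(adjacency: tuple[tuple[int, ...], ...]) -> bool:
--     n = len(adjacency)
--     order = sorted(range(n), key=lambda node: (-len(adjacency[node]), node))
--     colors = [-1] * n
--     i = 0
--     color = 0
--     while 0 <= i < n:
--         node = order[i]
--         # smallest candidate color, starting from `color`, not used by a colored neighbor
--         while color < COLOR_COUNT and any(colors[nb] == color for nb in adjacency[node]):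
--             color += 1
--         if color < COLOR_COUNT:
--             colors[node] = color
--             i += 1
--             color = 0
--         else:
--             i -= 1
--             if i < 0:
--                 return False
--             prev = order[i]
--             color = colors[prev] + 1
--             colors[prev] = -1
--     return True
-- ===== Notes on version B (the rewrite author's own statement) =====
-- stated objective: alternative
-- what changed: A's recursive backtracking that builds a set of forbidden colors per node is replaced by an explicit iterative search that keeps an index into the order and an incremental candidate color, scanning for the smallest non-conflicting color and undoing assignments on dead ends; Pre_ excludes adjacency lists with an out-of-range neighbour entry, on which A raises IndexError when the search reaches it.
-- outside the precondition, e.g. on three_colorable(((1, 2, 3), (0, 2, 3), (0, 1, 3), (0, 1, 2), (99,))): A returns False, B returns False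
import Mathlib
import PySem

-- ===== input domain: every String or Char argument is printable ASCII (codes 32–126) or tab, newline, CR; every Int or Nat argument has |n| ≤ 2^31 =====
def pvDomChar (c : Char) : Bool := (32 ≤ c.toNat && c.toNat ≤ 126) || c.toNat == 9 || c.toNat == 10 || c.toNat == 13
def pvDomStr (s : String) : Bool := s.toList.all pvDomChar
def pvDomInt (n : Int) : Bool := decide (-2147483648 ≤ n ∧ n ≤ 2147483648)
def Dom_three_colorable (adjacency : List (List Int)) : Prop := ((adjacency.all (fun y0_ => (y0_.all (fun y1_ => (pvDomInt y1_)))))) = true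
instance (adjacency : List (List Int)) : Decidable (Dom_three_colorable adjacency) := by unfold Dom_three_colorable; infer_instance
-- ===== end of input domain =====

-- B replaces A's recursive backtracking (forbidden-color set per node) by an explicit
-- iterative search with an incremental smallest-free-color scan; alternative decomposition, not faster.

-- ===== PORT A =====
-- order = sorted(range(len(adjacency)), key=lambda node: (-len(adjacency[node]), node))
def pvOrder (adjacency : List (List Int)) : List Int :=
  PySem.List.sorted2 (PySem.List.pyRange 0 (adjacency.length : Int) 1)
    (fun node => -(((PySem.List.pyGetD adjacency node []).length : Int)))
    (fun node => node) false

-- unavailable = {colors[neighbor] for neighbor in adjacency[node] if colors[neighbor] != -1}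
-- colors[neighbor] is pyGet?; the none case (IndexError) is excluded by Pre_three_colorable
def pvUnavail (colors : List Int) (row : List Int) : PySem.Set Int :=
  row.foldl (fun s v =>
    match PySem.List.pyGet? colors v with
    | some x => if x ≠ -1 then PySem.Set.add s x else s
    | none => s) PySem.Set.empty

-- def backtrack(index): …  — the suffix `rest` of `order` stands for `order[index:]`;
-- `colors[node] = -1` restores the list unchanged before the next candidate color,
-- so the for-loop over range(3) = [0,1,2] with early return is exactly this `any`
def pvBacktrackA (adjacency : List (List Int)) : List Int → List Int → Bool
  | [], _ => true
  | node :: rest, colors =>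
    let row := PySem.List.pyGetD adjacency node []
    let unavailable := pvUnavail colors row
    ([0, 1, 2] : List Int).any (fun color =>
      if PySem.Set.contains unavailable color then false
      else pvBacktrackA adjacency rest (PySem.List.pySetD colors node color))

def three_colorable (adjacency : List (List Int)) : Bool :=
  pvBacktrackA adjacency (pvOrder adjacency) (List.replicate adjacency.length (-1))

-- ===== PORT B =====
-- any(colors[nb] == color for nb in adjacency[node]); colors[nb] is pyGet?
-- (its none case, IndexError, is excluded by Pre_three_colorable)
def pvConfB (colors row : List Int) (c : Int) : Bool :=
  row.any (fun nb => PySem.List.pyGet? colors nb == some c)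

-- while color < COLOR_COUNT and any(…): color += 1
def pvFindB (colors row : List Int) (c : Int) : Int :=
  if h : c < 3 ∧ pvConfB colors row c then pvFindB colors row (c + 1) else c
  termination_by (3 - c).toNat
  decreasing_by omega

-- while 0 <= i < n: …  — fuel 5^(n+1) strictly exceeds the number of iterations
-- (each iteration increases a base-5 potential below 5^(n+1); lemma loopB_eq_resume),
-- so the fuel-0 branch is never taken from the initial state
def pvLoopB (adj : List (List Int)) (order : List Int) (n : Nat) :
    Nat → Int → List Int → Int → Bool
  | 0, _, _, _ => false
  | fuel + 1, i, colors, c =>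
    if 0 ≤ i ∧ i < (n : Int) then
      let node := PySem.List.pyGetD order i 0
      let row := PySem.List.pyGetD adj node []
      let c' := pvFindB colors row c
      if c' < 3 then pvLoopB adj order n fuel (i + 1) (PySem.List.pySetD colors node c') 0
      else if i - 1 < 0 then false
      else
        let prev := PySem.List.pyGetD order (i - 1) 0
        pvLoopB adj order n fuel (i - 1) (PySem.List.pySetD colors prev (-1))
          (PySem.List.pyGetD colors prev 0 + 1)
    else true

def three_colorable_alt (adjacency : List (List Int)) : Bool :=
  let n := adjacency.length
  let order := pvOrder adjacency
  pvLoopB adjacency order n (5 ^ (n + 1)) 0 (List.replicate n (-1)) 0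

-- ===== PRECONDITION & SPEC =====
-- Pre_ excludes adjacency lists with an out-of-range neighbour entry (v < -n or n ≤ v):
-- A raises IndexError as soon as the backtracking search processes such a vertex
-- (on a few unsatisfiable inputs the search fails before reaching it and A still returns).
def Pre_three_colorable (adjacency : List (List Int)) : Prop :=
  ∀ row ∈ adjacency, ∀ v ∈ row, -(adjacency.length : Int) ≤ v ∧ v < (adjacency.length : Int)
instance (adjacency : List (List Int)) : Decidable (Pre_three_colorable adjacency) := by
  unfold Pre_three_colorable; infer_instance

def pvWitness_three_colorable : List (List Int) := [[1, 2], [0], [0]]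

def Spec_three_colorable (adjacency : List (List Int)) (out : Bool) : Prop := out = three_colorable_alt adjacency
instance (adjacency : List (List Int)) (out : Bool) : Decidable (Spec_three_colorable adjacency out) := by unfold Spec_three_colorable; infer_instance

-- ===== CLAIM (what is proved, stated in full; the proofs are below) =====
def Claim_equal_three_colorable : Prop := ∀ (adjacency : List (List Int)), Dom_three_colorable adjacency → Pre_three_colorable adjacency → Spec_three_colorable adjacency (three_colorable adjacency)

-- ===== LEMMAS AND PROOFS =====

-- ---- the shared vertex order, as natural numbers ----

def ordN (a : List (List Int)) : List Nat := (pvOrder a).map Int.toNat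

lemma pvOrder_perm (a : List (List Int)) :
    (pvOrder a).Perm (PySem.List.pyRange 0 (a.length : Int) 1) :=
  PySem.List.sorted2_perm _ _ _ _

lemma ordN_perm (a : List (List Int)) : (ordN a).Perm (List.range a.length) := by
  have h := (pvOrder_perm a).map Int.toNat
  rw [PySem.List.pyRange_zero_nat, List.map_map] at h
  unfold ordN
  have h2 : (Int.toNat ∘ fun (k : Nat) => (k : Int)) = id := by funext k; simp
  rw [h2, List.map_id] at h
  exact h

lemma pvOrder_eq_map (a : List (List Int)) :
    pvOrder a = (ordN a).map (fun (u : Nat) => (u : Int)) := by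
  unfold ordN
  rw [List.map_map]
  have hnn : ∀ x ∈ pvOrder a, 0 ≤ x := by
    intro x hx
    have := (pvOrder_perm a).mem_iff.mp hx
    rw [PySem.List.mem_pyRange_one] at this
    omega
  conv_lhs => rw [← List.map_id (pvOrder a)]
  exact (List.map_congr_left (fun x hx => by
    simp [Function.comp, Int.toNat_of_nonneg (hnn x hx)])).symm

lemma ordN_nodup (a : List (List Int)) : (ordN a).Nodup :=
  (ordN_perm a).nodup_iff.mpr (List.nodup_range)

lemma ordN_length (a : List (List Int)) : (ordN a).length = a.length := by
  rw [(ordN_perm a).length_eq, List.length_range]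

lemma ordN_mem_lt (a : List (List Int)) (u : Nat) (hu : u ∈ ordN a) : u < a.length := by
  rw [(ordN_perm a).mem_iff, List.mem_range] at hu
  exact hu

-- ---- generic getD/set facts ----

lemma getD_set_self (l : List Int) (u : Nat) (c : Int) (hu : u < l.length) :
    (l.set u c).getD u 0 = c := by
  rw [List.getD_eq_getElem?_getD, List.getElem?_set, if_pos rfl, if_pos hu]; rfl

lemma getD_set_ne (l : List Int) (u x : Nat) (c : Int) (h : x ≠ u) :
    (l.set u c).getD x 0 = l.getD x 0 := by
  rw [List.getD_eq_getElem?_getD, List.getElem?_set, if_neg (fun he => h he.symm),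
    ← List.getD_eq_getElem?_getD]

lemma getD_last (s : List Int) (h : s ≠ []) : s.getD (s.length - 1) 0 = s.getLastD 0 := by
  rcases List.eq_nil_or_concat s with rfl | ⟨t, a, rfl⟩
  · exact absurd rfl h
  · simp [List.getD_eq_getElem?_getD]

lemma any_congr_mem {alpha : Type} (l : List alpha) (f g : alpha → Bool)
    (h : ∀ x ∈ l, f x = g x) : l.any f = l.any g := by
  induction l with
  | nil => rfl
  | cons x t ih =>
    simp only [List.any_cons]
    rw [h x List.mem_cons_self, ih (fun y hy => h y (List.mem_cons_of_mem _ hy))]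

-- ---- the unavailable set vs the incremental conflict check ----

lemma mem_unavail (colors row : List Int) (x : Int) :
    x ∈ pvUnavail colors row ↔ x ≠ -1 ∧ ∃ v ∈ row, PySem.List.pyGet? colors v = some x := by
  have aux : ∀ (r : List Int) (s : PySem.Set Int),
      x ∈ r.foldl (fun s v =>
        match PySem.List.pyGet? colors v with
        | some y => if y ≠ -1 then PySem.Set.add s y else s
        | none => s) s ↔
      x ∈ s ∨ (x ≠ -1 ∧ ∃ v ∈ r, PySem.List.pyGet? colors v = some x) := by
    intro r
    induction r with
    | nil => simp
    | cons v r ih =>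
      intro s
      simp only [List.foldl_cons]
      rcases hg : PySem.List.pyGet? colors v with _ | y
      · rw [ih]
        simp only [List.mem_cons]
        constructor
        · rintro (h | ⟨h1, w, hw, hww⟩)
          · exact Or.inl h
          · exact Or.inr ⟨h1, w, Or.inr hw, hww⟩
        · rintro (h | ⟨h1, w, (rfl | hw), hww⟩)
          · exact Or.inl h
          · rw [hg] at hww; cases hww
          · exact Or.inr ⟨h1, w, hw, hww⟩
      · by_cases hy : y = -1
        · subst hy
          simp only [ne_eq, not_true_eq_false, if_false, ih]
          constructor
          · rintro (h | ⟨h1, w, hw, hww⟩)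
            · exact Or.inl h
            · exact Or.inr ⟨h1, w, List.mem_cons_of_mem _ hw, hww⟩
          · rintro (h | ⟨h1, w, hw, hww⟩)
            · exact Or.inl h
            · rcases List.mem_cons.mp hw with rfl | hw
              · rw [hg] at hww
                exact absurd rfl (by injection hww with h'; rw [← h'] at h1; exact h1)
              · exact Or.inr ⟨h1, w, hw, hww⟩
        · simp only [ne_eq, hy, not_false_eq_true, if_true, ih, PySem.Set.mem_add]
          constructor
          · rintro (⟨h | rfl⟩ | ⟨h1, w, hw, hww⟩)
            · exact Or.inl h
            · exact Or.inr ⟨hy, v, List.mem_cons_self, hg⟩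
            · exact Or.inr ⟨h1, w, List.mem_cons_of_mem _ hw, hww⟩
          · rintro (h | ⟨h1, w, hw, hww⟩)
            · exact Or.inl (Or.inl h)
            · rcases List.mem_cons.mp hw with rfl | hw
              · rw [hg] at hww; injection hww with h'; exact Or.inl (Or.inr h'.symm)
              · exact Or.inr ⟨h1, w, hw, hww⟩
  unfold pvUnavail
  rw [aux]
  simp [PySem.Set.empty]

lemma confB_eq_contains (colors row : List Int) (c : Int) (hc : 0 ≤ c) :
    pvConfB colors row c = PySem.Set.contains (pvUnavail colors row) c := by
  rw [Bool.eq_iff_iff]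
  unfold pvConfB
  rw [List.any_eq_true, PySem.Set.contains_iff, mem_unavail]
  constructor
  · rintro ⟨v, hv, hvv⟩
    rw [beq_iff_eq] at hvv
    exact ⟨by omega, v, hv, hvv⟩
  · rintro ⟨_, v, hv, hvv⟩
    exact ⟨v, hv, by rw [beq_iff_eq]; exact hvv⟩

-- ---- colorsOf: the colors list determined by the stack of assigned colors ----

def colorsOf (n : Nat) (ordn : List Nat) (s : List Int) : List Int :=
  ((ordn.take s.length).zip s).foldl (fun col p => col.set p.1 p.2) (List.replicate n (-1))

lemma colorsOf_nil (n : Nat) (ordn : List Nat) :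
    colorsOf n ordn [] = List.replicate n (-1) := rfl

lemma length_foldl_set (l : List (Nat × Int)) (init : List Int) :
    (l.foldl (fun col p => col.set p.1 p.2) init).length = init.length := by
  induction l generalizing init with
  | nil => rfl
  | cons p t ih => rw [List.foldl_cons, ih, List.length_set]

lemma length_colorsOf (n : Nat) (ordn : List Nat) (s : List Int) :
    (colorsOf n ordn s).length = n := by
  unfold colorsOf
  rw [length_foldl_set, List.length_replicate]

lemma colorsOf_push (n : Nat) (ordn : List Nat) (s : List Int) (c : Int)
    (hlen : s.length < ordn.length) :
    colorsOf n ordn (s ++ [c]) = (colorsOf n ordn s).set (ordn.getD s.length 0) c := by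
  unfold colorsOf
  have h1 : (s ++ [c]).length = s.length + 1 := by simp
  rw [h1, List.take_add_one, List.getElem?_eq_getElem hlen]
  have h2 : (ordn.take s.length ++ [ordn[s.length]]).zip (s ++ [c])
      = (ordn.take s.length).zip s ++ [(ordn[s.length], c)] := by
    rw [List.zip_append (by rw [List.length_take]; omega)]
    rfl
  rw [Option.toList_some, h2, List.foldl_append]
  simp only [List.foldl_cons, List.foldl_nil]
  congr 1
  rw [List.getD_eq_getElem?_getD, List.getElem?_eq_getElem hlen]
  rfl

lemma colorsOf_getD_hi (n : Nat) (ordn : List Nat) (s : List Int)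
    (hnd : ordn.Nodup) (hlt : ∀ x ∈ ordn, x < n) (hlen : s.length ≤ ordn.length) :
    ∀ j, s.length ≤ j → j < ordn.length →
      (colorsOf n ordn s).getD (ordn.getD j 0) 0 = -1 := by
  induction s using List.reverseRecOn with
  | nil =>
    intro j _ hj
    rw [colorsOf_nil, List.getD_eq_getElem?_getD,
      List.getElem?_replicate, if_pos (hlt _ (by
        rw [List.getD_eq_getElem?_getD, List.getElem?_eq_getElem hj]
        exact List.getElem_mem _))]
    rfl
  | append_singleton t c ih =>
    intro j hj1 hj2
    have ht : t.length < ordn.length := by simp at hlen; omega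
    rw [colorsOf_push n ordn t c ht]
    have hne : ordn.getD j 0 ≠ ordn.getD t.length 0 := by
      intro he
      have := List.Nodup.getElem_inj_iff hnd (i := j) (j := t.length)
        (hi := hj2) (hj := ht)
      rw [List.getD_eq_getElem?_getD, List.getElem?_eq_getElem hj2,
        List.getD_eq_getElem?_getD, List.getElem?_eq_getElem ht] at he
      simp only [Option.getD_some] at he
      have hjj : j = t.length := this.mp he
      simp at hj1
      omega
    rw [getD_set_ne _ _ _ _ hne]
    exact ih (by omega) j (by simp at hj1; omega) hj2

lemma colorsOf_getD_lo (n : Nat) (ordn : List Nat) (s : List Int)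
    (hnd : ordn.Nodup) (hlt : ∀ x ∈ ordn, x < n) (hlen : s.length ≤ ordn.length) :
    ∀ j, j < s.length → (colorsOf n ordn s).getD (ordn.getD j 0) 0 = s.getD j 0 := by
  induction s using List.reverseRecOn with
  | nil => intro j hj; simp at hj
  | append_singleton t c ih =>
    intro j hj
    have ht : t.length < ordn.length := by simp at hlen; omega
    rw [colorsOf_push n ordn t c ht]
    simp only [List.length_append, List.length_cons, List.length_nil] at hj
    by_cases hjt : j = t.length
    · subst hjt
      rw [getD_set_self _ _ _ (by
        rw [length_colorsOf]
        apply hlt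
        rw [List.getD_eq_getElem?_getD, List.getElem?_eq_getElem ht]
        exact List.getElem_mem _)]
      rw [List.getD_eq_getElem?_getD, List.getElem?_append_right (le_refl _)]
      simp
    · have hjlt : j < t.length := by omega
      have hne : ordn.getD j 0 ≠ ordn.getD t.length 0 := by
        intro he
        have := List.Nodup.getElem_inj_iff hnd (i := j) (j := t.length)
          (hi := by omega) (hj := ht)
        rw [List.getD_eq_getElem?_getD, List.getElem?_eq_getElem (show j < ordn.length by omega),
          List.getD_eq_getElem?_getD, List.getElem?_eq_getElem ht] at he
        simp only [Option.getD_some] at he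
        exact hjt (this.mp he)
      rw [getD_set_ne _ _ _ _ hne, ih (by omega) j hjlt,
        List.getD_eq_getElem?_getD, List.getD_eq_getElem?_getD,
        List.getElem?_append_left hjlt]

lemma set_getD_self_eq (l : List Int) (p : Nat) (hp : p < l.length)
    (hv : l.getD p 0 = -1) : l.set p (-1) = l := by
  apply List.ext_getElem?
  intro k
  rw [List.getElem?_set]
  by_cases hk : p = k
  · subst hk
    rw [if_pos rfl, if_pos hp]
    rw [List.getD_eq_getElem?_getD, List.getElem?_eq_getElem hp] at hv
    simp only [Option.getD_some] at hv
    rw [List.getElem?_eq_getElem hp, hv]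
  · rw [if_neg hk]

lemma colorsOf_pop (n : Nat) (ordn : List Nat) (s : List Int)
    (hnd : ordn.Nodup) (hlt : ∀ x ∈ ordn, x < n)
    (hs : s ≠ []) (hlen : s.length ≤ ordn.length) :
    (colorsOf n ordn s).set (ordn.getD (s.length - 1) 0) (-1)
      = colorsOf n ordn s.dropLast := by
  rcases List.eq_nil_or_concat s with rfl | ⟨t, c, rfl⟩
  · exact absurd rfl hs
  simp only [List.concat_eq_append] at hs hlen ⊢
  have ht : t.length < ordn.length := by simp at hlen; omega
  have hlast : (t ++ [c]).length - 1 = t.length := by simp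
  rw [hlast, colorsOf_push n ordn t c ht, List.set_set,
    List.dropLast_concat]
  apply set_getD_self_eq
  · rw [length_colorsOf]
    apply hlt
    rw [List.getD_eq_getElem?_getD, List.getElem?_eq_getElem ht]
    exact List.getElem_mem _
  · exact colorsOf_getD_hi n ordn t hnd hlt (by omega) t.length (le_refl _) ht

-- ---- A's search, re-expressed as a structural recursion on the order suffix ----

def btA (a : List (List Int)) : List Nat → List Int → Nat → Bool
  | [], _, _ => true
  | node :: rest, colors, c =>
    if h : c < 3 then
      ((!PySem.Set.contains (pvUnavail colors (PySem.List.pyGetD a ((node : Nat) : Int) []))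
          ((c : Nat) : Int))
          && btA a rest (colors.set node ((c : Nat) : Int)) 0)
        || btA a (node :: rest) colors (c + 1)
    else false
  termination_by l _ c => 4 * l.length + (3 - c)
  decreasing_by
  · simp only [List.length_cons]; omega
  · omega

lemma btA_eq_backtrackA (a : List (List Int)) :
    ∀ (l : List Nat) (colors : List Int),
      btA a l colors 0 = pvBacktrackA a (l.map (fun (u : Nat) => (u : Int))) colors := by
  intro l
  induction l with
  | nil => intro colors; rw [btA]; rfl
  | cons node rest ih =>
    intro colors
    rw [List.map_cons]
    show btA a (node :: rest) colors 0 =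
      ([0, 1, 2] : List Int).any (fun color =>
        if PySem.Set.contains (pvUnavail colors (PySem.List.pyGetD a ((node : Nat) : Int) []))
            color then false
        else pvBacktrackA a (rest.map (fun (u : Nat) => (u : Int)))
          (PySem.List.pySetD colors ((node : Nat) : Int) color))
    have hsetD : ∀ (c : Int), PySem.List.pySetD colors ((node : Nat) : Int) c
        = colors.set node c := by
      intro c; simp [PySem.List.pySetD_natCast]
    have hstep : ∀ (c : Int),
        (if PySem.Set.contains (pvUnavail colors (PySem.List.pyGetD a ((node : Nat) : Int) []))
            c then false
         else pvBacktrackA a (rest.map (fun (u : Nat) => (u : Int)))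
           (PySem.List.pySetD colors ((node : Nat) : Int) c))
        = ((!PySem.Set.contains (pvUnavail colors (PySem.List.pyGetD a ((node : Nat) : Int) []))
            c) && pvBacktrackA a (rest.map (fun (u : Nat) => (u : Int))) (colors.set node c)) := by
      intro c
      rw [hsetD]
      cases PySem.Set.contains (pvUnavail colors (PySem.List.pyGetD a ((node : Nat) : Int) [])) c
        <;> simp
    rw [show ([0, 1, 2] : List Int).any (fun color =>
        if PySem.Set.contains (pvUnavail colors (PySem.List.pyGetD a ((node : Nat) : Int) []))
            color then false
        else pvBacktrackA a (rest.map (fun (u : Nat) => (u : Int)))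
          (PySem.List.pySetD colors ((node : Nat) : Int) color)) = _ from rfl]
    simp only [List.any_cons, List.any_nil, hstep]
    rw [btA, dif_pos (by omega), btA, dif_pos (by omega), btA, dif_pos (by omega),
      btA, dif_neg (by omega)]
    rw [ih, ih, ih]
    norm_num

-- ---- B's search, re-expressed as a recursion on the stack of assigned colors ----

def extF (a : List (List Int)) : List Int → Nat → Bool
  | s, c =>
    if h1 : s.length < a.length then
      if h2 : c < 3 then
        ((!pvConfB (colorsOf a.length (ordN a) s)
            (PySem.List.pyGetD a (((ordN a).getD s.length 0 : Nat) : Int) []) ((c : Nat) : Int))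
            && extF a (s ++ [((c : Nat) : Int)]) 0)
          || extF a s (c + 1)
      else false
    else true
  termination_by s c => 4 * (a.length - s.length) + (3 - c)
  decreasing_by
  · simp only [List.length_append, List.length_cons, List.length_nil]; omega
  · omega

lemma extF_eq_btA (a : List (List Int)) :
    ∀ (k : Nat) (s : List Int) (c : Nat), 4 * (a.length - s.length) + (3 - c) ≤ k →
      s.length ≤ a.length → c ≤ 3 →
      extF a s c = btA a ((ordN a).drop s.length) (colorsOf a.length (ordN a) s) c := by
  intro k
  induction k with
  | zero =>
    intro s c hk hs hc
    by_cases h1 : s.length < a.length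
    · omega
    · have hslen : s.length = a.length := by omega
      rw [extF, dif_neg h1, List.drop_of_length_le (by rw [ordN_length]; omega), btA]
  | succ k ih =>
    intro s c hk hs hc
    by_cases h1 : s.length < a.length
    · have hlt : s.length < (ordN a).length := by rw [ordN_length]; exact h1
      have hnode : (ordN a).getD s.length 0 = (ordN a)[s.length] := by
        rw [List.getD_eq_getElem?_getD, List.getElem?_eq_getElem hlt]; rfl
      have hdrop : (ordN a).drop s.length
          = (ordN a).getD s.length 0 :: (ordN a).drop (s.length + 1) := by
        rw [hnode]; exact List.drop_eq_getElem_cons hlt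
      by_cases h2 : c < 3
      · rw [extF, dif_pos h1, dif_pos h2, hdrop, btA, dif_pos h2]
        rw [confB_eq_contains _ _ _ (by omega)]
        congr 1
        · congr 1
          rw [ih (s ++ [((c : Nat) : Int)]) 0
            (by simp only [List.length_append, List.length_cons, List.length_nil]; omega)
            (by simp only [List.length_append, List.length_cons, List.length_nil]; omega)
            (by omega)]
          rw [colorsOf_push a.length (ordN a) s _ hlt]
          have : (s ++ [((c : Nat) : Int)]).length = s.length + 1 := by simp
          rw [this]
        · rw [ih s (c + 1) (by omega) hs (by omega), hdrop]
      · rw [extF, dif_pos h1, dif_neg h2, hdrop, btA, dif_neg h2]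
    · have hslen : s.length = a.length := by omega
      rw [extF, dif_neg h1, List.drop_of_length_le (by rw [ordN_length]; omega), btA]

-- ---- pvFindB facts ----

lemma findB_ge (colors row : List Int) (c : Int) : c ≤ pvFindB colors row c := by
  fun_induction pvFindB with
  | case1 c h ih => omega
  | case2 c h => omega

lemma findB_le (colors row : List Int) (c : Int) (h : c ≤ 3) : pvFindB colors row c ≤ 3 := by
  fun_induction pvFindB with
  | case1 c h ih => exact ih (by omega)
  | case2 c h => omega

lemma findB_no_conflict (colors row : List Int) (c : Int)
    (h : pvFindB colors row c < 3) : pvConfB colors row (pvFindB colors row c) = false := by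
  fun_induction pvFindB with
  | case1 c hcc ih => exact ih h
  | case2 c hcc =>
    rcases Decidable.not_and_iff_not_or_not.mp hcc with h3 | hcf
    · omega
    · exact Bool.not_eq_true _ ▸ (by simpa using hcf)

lemma findB_conflicts (colors row : List Int) (c d : Int)
    (hd1 : c ≤ d) (hd2 : d < pvFindB colors row c) : pvConfB colors row d = true := by
  fun_induction pvFindB generalizing d with
  | case1 c hcc ih =>
    by_cases hdc : d = c
    · exact hdc ▸ hcc.2
    · exact ih d (by omega) hd2
  | case2 c hcc => omega

-- ---- the resumption semantics of B's loop ----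

def resF (a : List (List Int)) (s : List Int) (c : Int) : Bool :=
  extF a s c.toNat
    || (List.range s.length).any (fun j => extF a (s.take j) ((s.getD j 0).toNat + 1))

lemma extF_skip (a : List (List Int)) (s : List Int) (c c' : Nat)
    (h1 : c ≤ c') (h2 : c' ≤ 3)
    (hconf : ∀ d : Nat, c ≤ d → d < c' →
      pvConfB (colorsOf a.length (ordN a) s)
        (PySem.List.pyGetD a (((ordN a).getD s.length 0 : Nat) : Int) []) ((d : Nat) : Int)
        = true) :
    extF a s c = extF a s c' := by
  induction hk : c' - c generalizing c with
  | zero =>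
    have : c = c' := by omega
    rw [this]
  | succ k ihk =>
    have hcc : c < c' := by omega
    have step : extF a s c = extF a s (c + 1) := by
      by_cases hsn : s.length < a.length
      · rw [extF, dif_pos hsn, dif_pos (by omega), hconf c (le_refl c) hcc]
        simp
      · rw [extF, dif_neg hsn]
        conv_rhs => rw [extF, dif_neg hsn]
    rw [step]
    exact ihk (c + 1) (by omega) (fun d hd1 hd2 => hconf d (by omega) hd2) (by omega)

lemma resume_push (a : List (List Int)) (s : List Int) (c c' : Int)
    (hsn : s.length < a.length) (hc0 : 0 ≤ c) (hc3 : c' < 3) (hcc : c ≤ c')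
    (hnoc : pvConfB (colorsOf a.length (ordN a) s)
      (PySem.List.pyGetD a (((ordN a).getD s.length 0 : Nat) : Int) []) c' = false)
    (hconfs : ∀ d : Int, c ≤ d → d < c' →
      pvConfB (colorsOf a.length (ordN a) s)
        (PySem.List.pyGetD a (((ordN a).getD s.length 0 : Nat) : Int) []) d = true) :
    resF a (s ++ [c']) 0 = resF a s c := by
  have hc'0 : 0 ≤ c' := by omega
  have hcast : ((c'.toNat : Nat) : Int) = c' := by omega
  have hkey : extF a s c.toNat =
      (extF a (s ++ [c']) 0 || extF a s (c'.toNat + 1)) := by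
    have hskip : extF a s c.toNat = extF a s c'.toNat := by
      apply extF_skip a s c.toNat c'.toNat (by omega) (by omega)
      intro d hd1 hd2
      apply hconfs (d : Int) (by omega) (by omega)
    rw [hskip, extF, dif_pos hsn, dif_pos (by omega), hcast, hnoc]
    simp
  unfold resF
  have hlen1 : (s ++ [c']).length = s.length + 1 := by simp
  rw [hlen1, List.range_succ, List.any_append]
  have h1 : (s ++ [c']).take s.length = s := by
    rw [List.take_append_of_le_length (le_refl _)]
    simp
  have h2 : (s ++ [c']).getD s.length 0 = c' := by
    rw [List.getD_eq_getElem?_getD, List.getElem?_append_right (le_refl _)]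
    simp
  have hany : (List.range s.length).any (fun j => extF a ((s ++ [c']).take j)
      (((s ++ [c']).getD j 0).toNat + 1))
      = (List.range s.length).any (fun j => extF a (s.take j) ((s.getD j 0).toNat + 1)) := by
    apply any_congr_mem
    intro j hj
    rw [List.mem_range] at hj
    rw [List.take_append_of_le_length (by omega),
      List.getD_eq_getElem?_getD, List.getElem?_append_left hj, ← List.getD_eq_getElem?_getD]
  simp only [List.any_cons, List.any_nil, Bool.or_false]
  rw [h1, h2, hany, hkey]
  have hz : ((0 : Int)).toNat = 0 := rfl
  rw [hz]
  cases extF a (s ++ [c']) 0 <;> cases extF a s (c'.toNat + 1) <;>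
    cases (List.range s.length).any (fun j => extF a (s.take j) ((s.getD j 0).toNat + 1)) <;> rfl

lemma resume_pop (a : List (List Int)) (s : List Int) (c : Int)
    (hnil : s ≠ []) (h0 : 0 ≤ s.getLastD 0)
    (hext : extF a s c.toNat = false) :
    resF a s.dropLast (s.getLastD 0 + 1) = resF a s c := by
  unfold resF
  have hpos : 0 < s.length := List.length_pos_of_ne_nil hnil
  have hlend : s.dropLast.length = s.length - 1 := by simp
  rw [hlend, hext]
  have hrange : List.range s.length = List.range (s.length - 1) ++ [s.length - 1] := by
    have h : s.length = (s.length - 1) + 1 := by omega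
    conv_lhs => rw [h]
    rw [List.range_succ]
  rw [hrange, List.any_append]
  have ht1 : s.take (s.length - 1) = s.dropLast := List.dropLast_eq_take.symm
  have ht2 : s.getD (s.length - 1) 0 = s.getLastD 0 := getD_last s hnil
  have hcast : (s.getLastD 0 + 1).toNat = (s.getLastD 0).toNat + 1 := by omega
  have hany : (List.range (s.length - 1)).any
      (fun j => extF a (s.dropLast.take j) ((s.dropLast.getD j 0).toNat + 1))
      = (List.range (s.length - 1)).any
      (fun j => extF a (s.take j) ((s.getD j 0).toNat + 1)) := by
    apply any_congr_mem
    intro j hj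
    rw [List.mem_range] at hj
    have hta : s.dropLast.take j = s.take j := by
      rw [List.dropLast_eq_take, List.take_take]
      congr 1
      omega
    have hg : s.dropLast.getD j 0 = s.getD j 0 := by
      rw [List.dropLast_eq_take, List.getD_eq_getElem?_getD, List.getElem?_take_of_lt (by omega),
        ← List.getD_eq_getElem?_getD]
    rw [hta, hg]
  simp only [List.any_cons, List.any_nil, Bool.or_false]
  rw [ht1, ht2, hcast, hany]
  cases extF a s.dropLast ((s.getLastD 0).toNat + 1) <;>
    cases (List.range (s.length - 1)).any
      (fun j => extF a (s.take j) ((s.getD j 0).toNat + 1)) <;> rfl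

-- ---- the base-5 potential bounding the number of loop iterations ----

def potX (n : Nat) (s : List Int) (c : Int) : Nat :=
  ((List.range s.length).map (fun j => ((s.getD j 0).toNat.succ) * 5 ^ (n - j))).sum
    + (c.toNat + 1) * 5 ^ (n - s.length)

lemma potX_cons (n : Nat) (x : Int) (t : List Int) (c : Int) :
    potX n (x :: t) c = (x.toNat + 1) * 5 ^ n + potX (n - 1) t c := by
  unfold potX
  simp only [List.length_cons]
  rw [List.range_succ_eq_map, List.map_cons, List.sum_cons, List.map_map]
  have h1 : ∀ j : Nat, ((x :: t).getD (j + 1) 0) = t.getD j 0 := fun j => rfl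
  have h2 : (List.map ((fun j => ((x :: t).getD j 0).toNat.succ * 5 ^ (n - j)) ∘ Nat.succ)
      (List.range t.length))
      = List.map (fun j => (t.getD j 0).toNat.succ * 5 ^ (n - 1 - j)) (List.range t.length) := by
    apply List.map_congr_left
    intro j _
    simp only [Function.comp]
    rw [h1 j]
    congr 2
    omega
  rw [h2]
  have h3 : n - (t.length + 1) = n - 1 - t.length := by omega
  rw [h3]
  simp only [List.getD_cons_zero, Nat.sub_zero, Nat.succ_eq_add_one]
  ring

lemma potX_lt (n : Nat) (s : List Int) (c : Int) (hlen : s.length ≤ n)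
    (hent : ∀ x ∈ s, x = 0 ∨ x = 1 ∨ x = 2) (hc : c ≤ 3) : potX n s c < 5 ^ (n + 1) := by
  induction s generalizing n with
  | nil =>
    unfold potX
    simp only [List.length_nil, List.range_zero, List.map_nil, List.sum_nil,
      Nat.sub_zero, zero_add]
    have h1 : c.toNat + 1 ≤ 4 := by omega
    have h2 : (0 : Nat) < 5 ^ n := pow_pos (by norm_num) n
    calc (c.toNat + 1) * 5 ^ n ≤ 4 * 5 ^ n := Nat.mul_le_mul_right _ h1
    _ < 5 * 5 ^ n := by omega
    _ = 5 ^ (n + 1) := by rw [pow_succ]; ring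
  | cons x t ih =>
    rw [potX_cons]
    have hn1 : 1 ≤ n := by simp at hlen; omega
    have hx : x.toNat + 1 ≤ 3 := by
      rcases hent x List.mem_cons_self with rfl | rfl | rfl <;> decide
    have hih := ih (n - 1) (by simp at hlen ⊢; omega)
      (fun y hy => hent y (List.mem_cons_of_mem _ hy))
    have hsub : n - 1 + 1 = n := by omega
    rw [hsub] at hih
    have h5 : 5 ^ (n + 1) = 5 * 5 ^ n := by rw [pow_succ]; ring
    have h2 : (0 : Nat) < 5 ^ n := pow_pos (by norm_num) n
    calc (x.toNat + 1) * 5 ^ n + potX (n - 1) t c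
        ≤ 3 * 5 ^ n + potX (n - 1) t c := by
          exact Nat.add_le_add_right (Nat.mul_le_mul_right _ hx) _
    _ < 3 * 5 ^ n + 5 ^ n := by omega
    _ < 5 * 5 ^ n := by omega
    _ = 5 ^ (n + 1) := h5.symm

lemma potX_push (n : Nat) (s : List Int) (c c' : Int) (hlen : s.length < n) (hcc : c ≤ c') :
    potX n s c + 1 ≤ potX n (s ++ [c']) 0 := by
  induction s generalizing n with
  | nil =>
    unfold potX
    simp only [List.nil_append, List.length_nil, List.length_cons, List.range_zero,
      List.map_nil, List.sum_nil, zero_add, Nat.sub_zero, List.range_one, List.map_cons,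
      List.sum_cons, List.sum_nil, List.getD_cons_zero]
    have hmono : c.toNat ≤ c'.toNat := Int.toNat_le_toNat hcc
    have h1 : (0 : Nat) < 5 ^ (n - 1) := pow_pos (by norm_num) _
    have h2 : (c.toNat + 1) * 5 ^ n ≤ (c'.toNat + 1) * 5 ^ n :=
      Nat.mul_le_mul_right _ (by omega)
    norm_num
    omega
  | cons x t ih =>
    rw [List.cons_append, potX_cons, potX_cons]
    have hih := ih (n - 1) (by simp at hlen ⊢; omega)
    omega

lemma potX_pop (n : Nat) (s : List Int) (a c : Int) (hlast : s ≠ [])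
    (ha : s.getLastD 0 = a) (h0 : 0 ≤ a) (hlen : s.length ≤ n) (hc : c.toNat ≤ 3) :
    potX n s c + 1 ≤ potX n s.dropLast (a + 1) := by
  induction s generalizing n with
  | nil => exact absurd rfl hlast
  | cons x t ih =>
    cases t with
    | nil =>
      have hxa : x = a := by simpa using ha
      have hn1 : 1 ≤ n := by simpa using hlen
      have hd : ([x] : List Int).dropLast = [] := by simp
      rw [hd, potX_cons, hxa]
      unfold potX
      simp only [List.length_nil, List.range_zero, List.map_nil, List.sum_nil, zero_add,
        Nat.sub_zero]
      have h1 : (0 : Nat) < 5 ^ (n - 1) := pow_pos (by norm_num) _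
      have h5 : (5 : Nat) ^ n = 5 ^ (n - 1) * 5 := by
        rw [← pow_succ]; congr 1; omega
      have htn : (a + 1).toNat + 1 = a.toNat + 2 := by omega
      rw [htn]
      have h2 : (c.toNat + 1) * 5 ^ (n - 1) ≤ 4 * 5 ^ (n - 1) :=
        Nat.mul_le_mul_right _ (by omega)
      have h3 : (a.toNat + 2) * 5 ^ n = (a.toNat + 1) * 5 ^ n + 5 ^ (n - 1) * 5 := by
        rw [← h5]; ring
      omega
    | cons y t' =>
      have hdl : (x :: y :: t').dropLast = x :: (y :: t').dropLast := by simp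
      have hgl : (x :: y :: t').getLastD 0 = (y :: t').getLastD 0 := by simp
      rw [hdl, potX_cons n x (y :: t') c, potX_cons n x ((y :: t').dropLast) (a + 1)]
      have hih : potX (n - 1) (y :: t') c + 1 ≤ potX (n - 1) (y :: t').dropLast (a + 1) :=
        ih (n - 1) (by simp) (by rw [← hgl]; exact ha) (by simp at hlen ⊢; omega)
      omega

-- ---- the loop computes the resumption semantics ----

lemma ordI_getD (a : List (List Int)) (j : Nat) (hj : j < a.length) :
    (pvOrder a).getD j 0 = (((ordN a).getD j 0 : Nat) : Int) := by
  rw [pvOrder_eq_map a]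
  have hj' : j < (ordN a).length := by rw [ordN_length]; exact hj
  rw [List.getD_eq_getElem?_getD, List.getElem?_map, List.getElem?_eq_getElem hj',
    List.getD_eq_getElem?_getD, List.getElem?_eq_getElem hj']
  rfl

lemma loopB_eq_resume (a : List (List Int)) :
    ∀ (fuel : Nat) (s : List Int) (c : Int), s.length ≤ a.length →
    (∀ x ∈ s, x = 0 ∨ x = 1 ∨ x = 2) → 0 ≤ c → c ≤ 3 →
    5 ^ (a.length + 1) ≤ fuel + potX a.length s c →
    pvLoopB a (pvOrder a) a.length fuel ((s.length : Nat) : Int)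
      (colorsOf a.length (ordN a) s) c = resF a s c := by
  intro fuel
  induction fuel with
  | zero =>
    intro s c hlen hent hc0 hc3 hfuel
    exact absurd hfuel (by have := potX_lt a.length s c hlen hent hc3; omega)
  | succ fuel ih =>
    intro s c hlen hent hc0 hc3 hfuel
    set n := a.length with hn
    set ordn := ordN a with hordn
    set colors := colorsOf n ordn s with hcolors
    by_cases hsn : s.length < n
    · have hguard : (0 : Int) ≤ (s.length : Int) ∧ (s.length : Int) < (n : Int) := by
        constructor <;> [positivity; exact_mod_cast hsn]
      have hnode : PySem.List.pyGetD (pvOrder a) ((s.length : Nat) : Int) 0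
          = ((ordn.getD s.length 0 : Nat) : Int) := by
        rw [PySem.List.pyGetD_natCast, ordI_getD a s.length hsn]
      rw [pvLoopB, if_pos hguard]
      simp only [hnode]
      set row := PySem.List.pyGetD a ((ordn.getD s.length 0 : Nat) : Int) [] with hrow
      set c' := pvFindB colors row c with hc'
      have hge : c ≤ c' := findB_ge colors row c
      have hle : c' ≤ 3 := findB_le colors row c hc3
      by_cases hc'3 : c' < 3
      · rw [if_pos hc'3]
        have hsetD : PySem.List.pySetD colors ((ordn.getD s.length 0 : Nat) : Int) c'
            = colors.set (ordn.getD s.length 0) c' := by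
          simp [PySem.List.pySetD_natCast]
        have hpush : colors.set (ordn.getD s.length 0) c'
            = colorsOf n ordn (s ++ [c']) := by
          rw [colorsOf_push n ordn s c' (by rw [hordn, ordN_length]; exact hsn)]
        have hcast : ((s.length : Nat) : Int) + 1 = (((s ++ [c']).length : Nat) : Int) := by
          simp
        rw [hsetD, hpush, hcast]
        rw [ih (s ++ [c']) 0 (by simp; omega)
          (fun x hx => by
            rcases List.mem_append.mp hx with hx | hx
            · exact hent x hx
            · rw [List.mem_singleton.mp hx]; omega)
          (le_refl _) (by omega)
          (by have := potX_push n s c c' hsn hge; omega)]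
        exact resume_push a s c c' hsn hc0 hc'3 hge
          (findB_no_conflict colors row c hc'3)
          (fun d hd1 hd2 => findB_conflicts colors row c d hd1 hd2)
      · have hc'3' : c' = 3 := by omega
        have hext : extF a s c.toNat = false := by
          have hskip : extF a s c.toNat = extF a s 3 := by
            apply extF_skip a s c.toNat 3 (by omega) (le_refl _)
            intro d hd1 hd2
            exact findB_conflicts colors row c ((d : Nat) : Int) (by omega) (by omega)
          rw [hskip, extF, dif_pos hsn]
          simp
        rw [if_neg (by omega)]
        by_cases hs0 : s = []
        · subst hs0
          rw [if_pos (by simp)]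
          unfold resF
          rw [hext]
          simp
        · have hl0 : 0 < s.length := List.length_pos_of_ne_nil hs0
          rw [if_neg (by simp; omega)]
          have hprev : PySem.List.pyGetD (pvOrder a) (((s.length : Nat) : Int) - 1) 0
              = ((ordn.getD (s.length - 1) 0 : Nat) : Int) := by
            have : ((s.length : Nat) : Int) - 1 = (((s.length - 1 : Nat) : Nat) : Int) := by
              omega
            rw [this, PySem.List.pyGetD_natCast, ordI_getD a (s.length - 1) (by omega)]
          simp only [hprev]
          have hread : PySem.List.pyGetD colors ((ordn.getD (s.length - 1) 0 : Nat) : Int) 0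
              = s.getLastD 0 := by
            rw [PySem.List.pyGetD_natCast, hcolors, hordn]
            rw [colorsOf_getD_lo a.length (ordN a) s (ordN_nodup a)
              (fun x hx => ordN_mem_lt a x hx) (by rw [ordN_length]; omega)
              (s.length - 1) (by omega)]
            exact getD_last s hs0
          have hsetD : PySem.List.pySetD colors ((ordn.getD (s.length - 1) 0 : Nat) : Int) (-1)
              = colorsOf n ordn s.dropLast := by
            rw [PySem.List.pySetD_natCast]
            rw [hcolors, hordn]
            exact colorsOf_pop a.length (ordN a) s (ordN_nodup a)
              (fun x hx => ordN_mem_lt a x hx) hs0 (by rw [ordN_length]; omega)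
          have hcast : ((s.length : Nat) : Int) - 1 = ((s.dropLast.length : Nat) : Int) := by
            simp
            omega
          have hlastmem : s.getLastD 0 ∈ s := by
            rw [← getD_last s hs0, List.getD_eq_getElem?_getD,
              List.getElem?_eq_getElem (by omega)]
            exact List.getElem_mem _
          have hlast0 : 0 ≤ s.getLastD 0 := by
            rcases hent _ hlastmem with h | h | h <;> omega
          have hlast2 : s.getLastD 0 ≤ 2 := by
            rcases hent _ hlastmem with h | h | h <;> omega
          rw [hread, hsetD, hcast]
          rw [ih s.dropLast (s.getLastD 0 + 1)
            (by rw [List.length_dropLast]; omega)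
            (fun x hx => hent x (List.mem_of_mem_dropLast hx))
            (by omega) (by omega)
            (by have := potX_pop n s (s.getLastD 0) c hs0 rfl hlast0 hlen (by omega); omega)]
          exact resume_pop a s c hs0 hlast0 hext
    · have hslen : s.length = n := by omega
      rw [pvLoopB, if_neg (by rw [hslen]; omega)]
      unfold resF
      rw [extF, dif_neg (by omega)]
      simp

-- ===== VERDICT (by name: the statement is the Claim_ definition above) =====
theorem three_colorable_spec : Claim_equal_three_colorable := by
  intro a _hdom _hpre
  unfold Spec_three_colorable
  have hB : three_colorable_alt a = extF a [] 0 := by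
    show pvLoopB a (pvOrder a) a.length (5 ^ (a.length + 1)) 0
      (List.replicate a.length (-1)) 0 = extF a [] 0
    have h := loopB_eq_resume a (5 ^ (a.length + 1)) [] 0 (by simp) (by simp) (le_refl _)
      (by omega) (Nat.le_add_right _ _)
    rw [show ((([] : List Int).length : Nat) : Int) = 0 from rfl, colorsOf_nil] at h
    rw [h]
    unfold resF
    simp
  have hA : three_colorable a = extF a [] 0 := by
    unfold three_colorable
    rw [pvOrder_eq_map a, ← btA_eq_backtrackA a (ordN a) (List.replicate a.length (-1))]
    rw [extF_eq_btA a (4 * (a.length - 0) + (3 - 0)) [] 0 (by simp) (by simp) (by omega)]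
    rfl
  rw [hA, hB]
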